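-- pv_equiv track=rewrite | github.com/IlyaTsg/Laboratory_work | 0306_tsygankov_lab1.py | InNew3NumSys
-- ===== SOURCE A (Python) =====
-- def In3NumSys(digit):
--     new_digit = 0
--     i = 0
--     while digit>0:
--         new_digit += (digit%3)*10**(i)
--         digit //= 3
--         i += 1
--     return new_digit
--
-- def InNew3NumSys(digit):
--     digit = list(str(In3NumSys(digit)))
--     for i in range(len(digit)):
--         if i == len(digit)-1 and int(digit[len(digit)-(i+1)]) > 1:
--             if digit[len(digit)-(i+1)] == '2':
--                 digit[len(digit)-(i+1)] = '#'
--                 digit.insert(0, '1')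
--             elif digit[len(digit)-(i+1)] == '3':
--                 digit[len(digit)-(i+1)] = '0'
--                 digit.insert(0, '1')
--         elif digit[len(digit)-(i+1)] == '2':
--             digit[len(digit)-(i+1)] = '#'
--             digit[len(digit)-(i+2)] = str(int(digit[len(digit)-(i+2)]) + 1)
--         elif digit[len(digit)-(i+1)] == '3':
--             digit[len(digit)-(i+1)] = '0'
--             digit[len(digit)-(i+2)] = str(int(digit[len(digit)-(i+2)]) + 1)
--     string_d = ''
--     for i in digit:
--         string_d += i
--     return string_d
-- ===== SOURCE B (Python) =====
-- def InNew3NumSys(digit):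
--     # Direct balanced-ternary conversion: no decimal packing, no digit-string rewriting pass.
--     if digit <= 0:
--         return '0'
--     ds = []
--     n = digit
--     while n > 0:
--         r = n % 3
--         n //= 3
--         if r == 2:
--             ds.append('#')
--             n += 1
--         else:
--             ds.append(str(r))
--     ds.reverse()
--     return ''.join(ds)
-- ===== Notes on version B (the rewrite author's own statement) =====
-- stated objective: simpler
-- what changed: B converts to balanced ternary directly with one divide-by-3 loop and a carry (n += 1 when the remainder is 2), instead of A's packing the base-3 digits into a decimal integer, stringifying it, and rewriting the digit string index-by-index with carries and a leading insert.
import Mathlib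
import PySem

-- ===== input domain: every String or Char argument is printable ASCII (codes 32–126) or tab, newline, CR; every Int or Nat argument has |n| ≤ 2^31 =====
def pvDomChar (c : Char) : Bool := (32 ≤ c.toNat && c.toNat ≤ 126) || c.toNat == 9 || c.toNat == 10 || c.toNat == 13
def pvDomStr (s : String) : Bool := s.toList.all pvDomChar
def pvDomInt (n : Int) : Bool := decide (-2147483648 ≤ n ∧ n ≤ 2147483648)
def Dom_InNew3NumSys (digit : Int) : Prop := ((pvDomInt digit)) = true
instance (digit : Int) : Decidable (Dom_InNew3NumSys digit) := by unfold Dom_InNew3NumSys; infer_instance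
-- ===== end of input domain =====

-- B replaces A's decimal-packing + digit-string-rewriting pass by a direct divide-by-3 loop with a carry;
-- same return value for every int argument (both return "0" for digit <= 0).

-- ===== PORT A =====
-- while digit > 0: new_digit += (digit%3)*10**i; digit //= 3; i += 1
def In3NumSysLoop (digit new_digit : Int) (i : Nat) : Int :=
  if h : 0 < digit then
    In3NumSysLoop (PySem.Int.floordiv digit 3) (new_digit + (PySem.Int.mod digit 3) * 10 ^ i) (i + 1)
  else new_digit
termination_by digit.toNat
decreasing_by
  rw [PySem.Int.floordiv_eq_ediv_of_pos (by omega)]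
  omega

def In3NumSys (digit : Int) : Int := In3NumSysLoop digit 0 0

-- int(c) for a one-character string; A's list elements are always '0'..'3', so ofStr? never returns none
def chVal (c : Char) : Int := (PySem.Int.ofStr? (String.ofList [c])).getD 0

-- str(int(c) + 1): for the characters A actually increments ('0'..'2') this is again one character
def chSucc (c : Char) : Char := (PySem.Int.toChars (chVal c + 1)).headD ' '

-- one iteration of A's for-loop body (A's list of one-character strings is modeled as List Char);
-- every index len-(i+1) / len-(i+2) Python reads or writes is in range, so pyGetD/pySetD are exact
def stepA (d : List Char) (i : Int) : List Char :=
  let n : Int := d.length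
  let c := PySem.List.pyGetD d (n - (i + 1)) ' '
  if i = n - 1 ∧ 1 < chVal c then
    if c = '2' then '1' :: PySem.List.pySetD d (n - (i + 1)) '#'        -- digit.insert(0,'1') after the assignment
    else if c = '3' then '1' :: PySem.List.pySetD d (n - (i + 1)) '0'
    else d
  else if c = '2' then
    let d' := PySem.List.pySetD d (n - (i + 1)) '#'
    PySem.List.pySetD d' (n - (i + 2)) (chSucc (PySem.List.pyGetD d' (n - (i + 2)) ' '))
  else if c = '3' then
    let d' := PySem.List.pySetD d (n - (i + 1)) '0'
    PySem.List.pySetD d' (n - (i + 2)) (chSucc (PySem.List.pyGetD d' (n - (i + 2)) ' '))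
  else d

def InNew3NumSys (digit : Int) : String :=
  let ds := (PySem.Int.toStr (In3NumSys digit)).toList          -- digit = list(str(In3NumSys(digit)))
  let ds2 := (PySem.List.pyRange 0 (ds.length : Int) 1).foldl stepA ds
  String.ofList (ds2.foldl (fun acc c => acc ++ [c]) [])        -- string_d += i, on the char level

-- ===== PORT B =====
-- while n > 0: r = n % 3; n //= 3; if r == 2: ds.append('#'); n += 1 else: ds.append(str(r))
def altLoop (n : Int) (ds : List Char) : List Char :=
  if h : 0 < n then
    let r := PySem.Int.mod n 3
    let m := PySem.Int.floordiv n 3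
    if r = 2 then altLoop (m + 1) (ds ++ ['#'])
    else altLoop m (ds ++ PySem.Int.toChars r)
  else ds
termination_by n.toNat
decreasing_by
  all_goals rw [PySem.Int.floordiv_eq_ediv_of_pos (by omega)]
  · have : PySem.Int.mod n 3 = n % 3 := PySem.Int.mod_eq_emod_of_pos (by omega)
    omega
  · have : PySem.Int.mod n 3 = n % 3 := PySem.Int.mod_eq_emod_of_pos (by omega)
    omega

def InNew3NumSys_alt (digit : Int) : String :=
  if digit ≤ 0 then "0"
  else String.ofList ((altLoop digit []).reverse)   -- ds.reverse(); ''.join(ds)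

-- ===== PRECONDITION & SPEC =====
def Spec_InNew3NumSys (digit : Int) (out : String) : Prop := out = InNew3NumSys_alt digit
instance (digit : Int) (out : String) : Decidable (Spec_InNew3NumSys digit out) := by unfold Spec_InNew3NumSys; infer_instance

-- ===== CLAIM (what is proved, stated in full; the proofs are below) =====
def Claim_equal_InNew3NumSys : Prop := ∀ (digit : Int), Dom_InNew3NumSys digit → Spec_InNew3NumSys digit (InNew3NumSys digit)

-- ===== LEMMAS AND PROOFS =====

-- base-3 digits of n, least significant first
def digits3 (n : Nat) : List Nat :=
  if h : 0 < n then n % 3 :: digits3 (n / 3) else []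
termination_by n
decreasing_by omega

-- the decimal packing A's In3NumSys performs (least-significant digit first)
def pack : List Nat → Nat
  | [] => 0
  | d :: t => d + 10 * pack t

-- balanced-ternary output (least significant first) of a digit list with an incoming carry
def balc : List Nat → Nat → List Char
  | [], c => if c = 1 then ['1'] else []
  | d :: t, c =>
    if d + c = 2 then '#' :: balc t 1
    else if d + c = 3 then '0' :: balc t 1
    else Nat.digitChar (d + c) :: balc t 0

-- decimal digits of n, most significant first (mirror of Nat.toDigits)
def msbDigits (n : Nat) : List Char :=
  if h : n < 10 then [Nat.digitChar n]
  else msbDigits (n / 10) ++ [Nat.digitChar (n % 10)]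
termination_by n
decreasing_by omega

lemma digits3_lt3 (n : Nat) : ∀ x ∈ digits3 n, x < 3 := by
  induction n using Nat.strong_induction_on with
  | _ n ih =>
    rw [digits3]
    split
    · intro x hx
      rcases List.mem_cons.mp hx with h | h
      · omega
      · exact ih (n / 3) (by omega) x h
    · simp

lemma digits3_pack_pos (n : Nat) (h : 0 < n) : 0 < pack (digits3 n) := by
  induction n using Nat.strong_induction_on with
  | _ n ih =>
    rw [digits3]
    simp only [h, dif_pos, pack]
    by_cases h3 : 0 < n / 3
    · have := ih (n / 3) (by omega) h3
      omega
    · omega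

lemma in3_loop_eq (n : Nat) : ∀ (acc : Int) (i : Nat),
    In3NumSysLoop (n : Int) acc i = acc + 10 ^ i * (pack (digits3 n) : Int) := by
  induction n using Nat.strong_induction_on with
  | _ n ih =>
    intro acc i
    rw [In3NumSysLoop, digits3]
    by_cases h : 0 < n
    · have hpos : (0:Int) < (n:Int) := by exact_mod_cast h
      simp only [hpos, dif_pos, h, dif_pos]
      rw [show PySem.Int.floordiv (n:Int) 3 = ((n / 3 : Nat) : Int) from by exact_mod_cast PySem.Int.floordiv_natCast n 3,
          show PySem.Int.mod (n:Int) 3 = ((n % 3 : Nat) : Int) from by exact_mod_cast PySem.Int.mod_natCast n 3]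
      rw [ih (n / 3) (by omega)]
      simp only [pack]
      push_cast
      ring
    · have hneg : ¬ (0:Int) < (n:Int) := by exact_mod_cast h
      simp [hneg, h, pack]

lemma toDigitsCore_eq (f : Nat) : ∀ (n : Nat) (ds : List Char), n < 10 ^ f → 0 < f →
    Nat.toDigitsCore 10 f n ds = msbDigits n ++ ds := by
  induction f with
  | zero => intro n ds h hf; omega
  | succ f ih =>
    intro n ds h _
    rw [Nat.toDigitsCore]
    by_cases h0 : n / 10 = 0
    · simp only [h0, if_pos]
      conv_rhs => rw [msbDigits]
      have hn : n < 10 := by omega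
      simp [hn, Nat.mod_eq_of_lt hn]
    · have hn : ¬ n < 10 := by omega
      have hf1 : 0 < f := by
        by_contra hc
        have : f = 0 := by omega
        subst this
        simp at h
        omega
      simp only [h0, if_neg]
      rw [ih (n / 10) _ (by omega) hf1]
      conv_rhs => rw [msbDigits]
      simp [hn]

lemma toDigits_eq_msbDigits (n : Nat) : Nat.toDigits 10 n = msbDigits n := by
  rw [Nat.toDigits, toDigitsCore_eq _ _ _ ?_ (by omega)]
  · simp
  · calc n < 2 ^ n := Nat.lt_two_pow_self
      _ ≤ 10 ^ n := Nat.pow_le_pow_left (by omega) n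
      _ ≤ 10 ^ (n + 1) := Nat.pow_le_pow_right (by omega) (by omega)

lemma msbDigits_pack (n : Nat) (h : 0 < n) :
    msbDigits (pack (digits3 n)) = ((digits3 n).map Nat.digitChar).reverse := by
  induction n using Nat.strong_induction_on with
  | _ n ih =>
    rw [digits3]
    simp only [h, dif_pos, pack, List.map, List.reverse_cons]
    by_cases h3 : 0 < n / 3
    · have hp := digits3_pack_pos (n / 3) h3
      rw [msbDigits]
      have hmod : n % 3 < 3 := by omega
      have hnl : ¬ (n % 3 + 10 * pack (digits3 (n / 3)) < 10) := by omega
      simp only [hnl, dif_neg]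
      have hdiv : (n % 3 + 10 * pack (digits3 (n / 3))) / 10 = pack (digits3 (n / 3)) := by
        omega
      have hm : (n % 3 + 10 * pack (digits3 (n / 3))) % 10 = n % 3 := by
        omega
      rw [hdiv, hm, ih (n / 3) (by omega) h3]
      simp
    · have h0 : digits3 (n / 3) = [] := by
        have : n / 3 = 0 := by omega
        rw [this, digits3]
        simp
      rw [h0]
      simp only [pack, List.map, List.reverse_nil, List.nil_append]
      rw [msbDigits]
      have hlt : n % 3 + 10 * 0 < 10 := by omega
      simp [hlt]
      exact fun hc => absurd hc (by omega)

lemma altLoop_eq (n : Nat) : ∀ (c : Nat), c ≤ 1 → ∀ (ds : List Char),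
    altLoop ((n : Int) + (c : Int)) ds = ds ++ balc (digits3 n) c := by
  induction n using Nat.strong_induction_on with
  | _ n ih =>
    intro c hc ds
    rw [altLoop, digits3]
    have hmodc : PySem.Int.mod ((n:Int)+(c:Int)) 3 = (((n + c) % 3 : Nat) : Int) := by
      exact_mod_cast PySem.Int.mod_natCast (n + c) 3
    have hdivc : PySem.Int.floordiv ((n:Int)+(c:Int)) 3 = (((n + c) / 3 : Nat) : Int) := by
      exact_mod_cast PySem.Int.floordiv_natCast (n + c) 3
    by_cases h : 0 < n
    · have hpos : (0:Int) < (n:Int) + (c:Int) := by omega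
      simp only [hpos, dif_pos, h, dif_pos, hmodc, hdivc]
      set d := n % 3 with hd
      have hd3 : d < 3 := by omega
      by_cases h2 : d + c = 2
      · have hm : (n + c) % 3 = 2 := by omega
        have hdv : (n + c) / 3 = n / 3 := by omega
        rw [if_pos (by rw [hm]; norm_num)]
        rw [hdv]
        have := ih (n / 3) (by omega) 1 (by omega) (ds ++ ['#'])
        push_cast at this ⊢
        rw [this]
        rw [balc]
        simp [h2]
      · by_cases h3 : d + c = 3
        · have hm : (n + c) % 3 = 0 := by omega
          have hdv : (n + c) / 3 = n / 3 + 1 := by omega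
          rw [if_neg (by rw [hm]; norm_num)]
          rw [hm, hdv]
          have := ih (n / 3) (by omega) 1 (by omega) (ds ++ PySem.Int.toChars 0)
          push_cast at this ⊢
          rw [this]
          rw [balc]
          simp [h2, h3, show PySem.Int.toChars 0 = ['0'] from by decide]
        · have hdc : d + c < 2 := by omega
          have hm : (n + c) % 3 = d + c := by omega
          have hdv : (n + c) / 3 = n / 3 := by omega
          rw [if_neg (by rw [hm]; omega)]
          rw [hm, hdv]
          have := ih (n / 3) (by omega) 0 (by omega) (ds ++ PySem.Int.toChars (d + c))
          push_cast at this ⊢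
          rw [add_zero] at this
          rw [this]
          rw [balc]
          have h01 : d + c = 0 ∨ d + c = 1 := by omega
          rw [show ((d:Int) + (c:Int)) = ((d + c : Nat) : Int) from by push_cast; ring]
          rcases h01 with h01 | h01 <;> rw [h01] <;>
            simp [h01, show PySem.Int.toChars 0 = ['0'] from by decide,
              show PySem.Int.toChars 1 = ['1'] from by decide, Nat.digitChar]
    · have : n = 0 := by omega
      subst this
      simp only [Nat.zero_div, dif_neg (show ¬ 0 < 0 from by omega)]
      by_cases hc0 : c = 0
      · subst hc0
        rw [altLoop]
        simp [balc]
      · have hc1 : c = 1 := by omega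
        subst hc1
        rw [altLoop]
        norm_num [PySem.Int.mod_eq_emod_of_pos, PySem.Int.floordiv_eq_ediv_of_pos]
        rw [altLoop]
        simp [balc, show PySem.Int.toChars 1 = ['1'] from by decide]

lemma chVal_c0 : chVal '0' = 0 := by decide
lemma chVal_c1 : chVal '1' = 1 := by decide
lemma chVal_c2 : chVal '2' = 2 := by decide
lemma chVal_c3 : chVal '3' = 3 := by decide
lemma chSucc_c0 : chSucc '0' = '1' := by decide
lemma chSucc_c1 : chSucc '1' = '2' := by decide
lemma chSucc_c2 : chSucc '2' = '3' := by decide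

lemma getD_boundary (pre out : List Char) (x : Char) (k : Nat) (hk : k = pre.length) :
    (pre ++ x :: out).getD k ' ' = x := by
  subst hk
  simp [List.getD_eq_getElem?_getD, List.getElem?_append_right (le_refl _)]

lemma set_boundary (pre out : List Char) (x y : Char) (k : Nat) (hk : k = pre.length) :
    (pre ++ x :: out).set k y = pre ++ y :: out := by
  subst hk
  rw [List.set_append_right _ _ (le_refl _)]
  simp

-- A's loop body at the last index (the leftmost character, where it may insert a leading '1')
lemma stepA_last (d c : Nat) (hd : d < 3) (hc : c ≤ 1) (out : List Char) :
    stepA (Nat.digitChar (d + c) :: out) ((out.length : Nat) : Int) = (balc [d] c).reverse ++ out := by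
  interval_cases d <;> interval_cases c <;>
    simp [stepA, balc, Nat.digitChar, chVal_c0, chVal_c1, chVal_c2, chVal_c3,
      chSucc_c0, chSucc_c1, chSucc_c2, PySem.List.pyGetD_zero_cons, PySem.List.pySetD_of_nonneg]

-- A's loop body at a non-final index: convert the boundary digit, carry into its left neighbour
lemma stepA_mid (e d c : Nat) (rest' : List Nat) (he : e < 3) (hd : d < 3) (hc : c ≤ 1) (out : List Char) :
    stepA (((e :: rest').map Nat.digitChar).reverse ++ Nat.digitChar (d + c) :: out) ((out.length : Nat) : Int)
      = ((rest'.map Nat.digitChar).reverse) ++ Nat.digitChar (e + (if 2 ≤ d + c then 1 else 0)) ::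
          ((if d + c = 2 then '#' else if d + c = 3 then '0' else Nat.digitChar (d + c)) :: out) := by
  simp only [stepA, List.map, List.reverse_cons, List.length_append, List.length_cons,
    List.length_reverse, List.length_map, List.length_nil]
  push_cast
  ring_nf
  rw [show (1 + (rest'.length:Int)) = ((rest'.length + 1 : Nat) : Int) from by push_cast; ring]
  rw [if_neg (by rintro ⟨h1, -⟩; omega)]
  simp only [PySem.List.pyGetD_natCast, PySem.List.pySetD_natCast]
  rw [getD_boundary _ _ _ _ (by simp)]
  interval_cases d <;> interval_cases c <;> interval_cases e <;>
    simp [getD_boundary, set_boundary, chSucc_c0, chSucc_c1, chSucc_c2, Nat.digitChar]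

lemma fold_eq (rest : List Nat) : ∀ (d c : Nat) (out : List Char),
    (∀ x ∈ rest, x < 3) → d < 3 → c ≤ 1 →
    (PySem.List.pyRange ((out.length : Nat) : Int) ((rest.length + (out.length + 1) : Nat) : Int)).foldl
        stepA ((rest.map Nat.digitChar).reverse ++ Nat.digitChar (d + c) :: out)
      = (balc (d :: rest) c).reverse ++ out := by
  induction rest with
  | nil =>
    intro d c out _ hd hc
    simp only [List.length_nil, List.map_nil, List.reverse_nil, List.nil_append, Nat.zero_add]
    rw [PySem.List.pyRange_one_cons (by push_cast; omega)]
    rw [show PySem.List.pyRange ((out.length:Int) + 1) ((out.length + 1 : Nat) : Int) = [] from by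
      have h : ((out.length + 1 : Nat) : Int) ≤ (out.length:Int) + 1 := by push_cast; omega
      simp [pysem, h]]
    simp only [List.foldl_cons, List.foldl_nil]
    exact stepA_last d c hd hc out
  | cons e rest' ih =>
    intro d c out hlt hd hc
    rw [PySem.List.pyRange_one_cons (by push_cast; omega)]
    simp only [List.foldl_cons]
    rw [stepA_mid e d c rest' (hlt e (by simp)) hd hc out]
    set c' : Nat := if 2 ≤ d + c then 1 else 0 with hc'
    set x : Char := if d + c = 2 then '#' else if d + c = 3 then '0' else Nat.digitChar (d + c) with hx
    have hc'1 : c' ≤ 1 := by rw [hc']; split <;> omega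
    have := ih e c' (x :: out) (fun y hy => hlt y (List.mem_cons_of_mem _ hy))
      (hlt e (by simp)) hc'1
    rw [show ((out.length : Int) + 1) = (((x :: out).length : Nat) : Int) from by simp,
        show ((e :: rest').length + (out.length + 1) : Nat) = (rest'.length + ((x :: out).length + 1) : Nat) from by simp; omega]
    rw [this]
    have hbalc : balc (d :: e :: rest') c = x :: balc (e :: rest') c' := by
      rw [balc, hx, hc']
      by_cases h2 : d + c = 2
      · simp [h2]
      · by_cases h3 : d + c = 3
        · simp [h2, h3]
        · have : ¬ 2 ≤ d + c := by omega
          simp [h2, h3, this]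
    rw [hbalc]
    simp

-- ===== VERDICT (by name: the statement is the Claim_ definition above) =====
theorem InNew3NumSys_spec : Claim_equal_InNew3NumSys := by
  intro digit _
  unfold Spec_InNew3NumSys
  by_cases hpos : 0 < digit
  · -- digit > 0
    have hk : digit = ((digit.toNat : Nat) : Int) := by omega
    set k := digit.toNat with hkdef
    have hk0 : 0 < k := by omega
    -- A's packed number
    have hA : In3NumSys digit = (pack (digits3 k) : Int) := by
      rw [In3NumSys, hk, in3_loop_eq]
      simp
    have hchars : (PySem.Int.toStr (In3NumSys digit)).toList = ((digits3 k).map Nat.digitChar).reverse := by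
      rw [hA, PySem.Int.toList_toStr, PySem.Int.toChars]
      have hnn : ¬ ((pack (digits3 k) : Int) < 0) := by omega
      rw [if_neg hnn, Int.toNat_natCast, toDigits_eq_msbDigits, msbDigits_pack k hk0]
    rw [InNew3NumSys]
    simp only [hchars]
    have hd3 : digits3 k = k % 3 :: digits3 (k / 3) := by rw [digits3]; simp [hk0]
    have hfold :
        (PySem.List.pyRange 0 ((((digits3 k).map Nat.digitChar).reverse.length : Nat) : Int)).foldl
            stepA (((digits3 k).map Nat.digitChar).reverse)
          = (balc (digits3 k) 0).reverse := by
      rw [hd3]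
      have hshape : ((k % 3 :: digits3 (k / 3)).map Nat.digitChar).reverse
          = ((digits3 (k / 3)).map Nat.digitChar).reverse ++ Nat.digitChar (k % 3 + 0) :: [] := by
        simp
      rw [hshape]
      rw [show (0 : Int) = ((List.length ([] : List Char) : Nat) : Int) from by simp,
          show ((((digits3 (k / 3)).map Nat.digitChar).reverse ++ Nat.digitChar (k % 3 + 0) :: []).length : Nat)
            = ((digits3 (k / 3)).length + (List.length ([] : List Char) + 1) : Nat) from by simp]
      rw [fold_eq (digits3 (k / 3)) (k % 3) 0 [] (digits3_lt3 (k / 3)) (by omega) (by omega)]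
      simp
    rw [hfold, PySem.List.foldl_append_singleton]
    -- B's side
    rw [InNew3NumSys_alt, if_neg (by omega)]
    rw [hk, show ((k : Int)) = ((k : Int) + ((0 : Nat) : Int)) from by simp, altLoop_eq k 0 (by omega)]
    simp
  · -- digit ≤ 0: both return "0"
    have h0 : In3NumSys digit = 0 := by
      rw [In3NumSys, In3NumSysLoop]
      simp [hpos]
    rw [InNew3NumSys]
    simp only [h0]
    rw [InNew3NumSys_alt, if_pos (by omega)]
    decide
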